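-- pv_equiv track=rewrite | github.com/ronyahammad/Metaheuritics | MAXSAT Solver with Hillclimbing algos/multiVariable.py | generate_k_bit_neighbours
-- ===== SOURCE A (Python) =====
-- import itertools
--
-- def generate_k_bit_neighbours(solution, k):
--     neighbours = []
--     indices = list(range(len(solution)))
--     for bit_indices in itertools.combinations(indices, k):
--         neighbour = list(solution)
--         for i in bit_indices:
--             neighbour[i] = 1 - neighbour[i]
--         neighbours.append(neighbour)
--     return neighbours
-- ===== SOURCE B (Python) =====
-- def generate_k_bit_neighbours(solution, k):
--     if k < 0:
--         raise ValueError("k must be non-negative")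
--     n = len(solution)
--     neighbours = []
--
--     def rec(start, remaining, current):
--         if remaining == 0:
--             neighbours.append(current)
--             return
--         for i in range(start, n - remaining + 1):
--             flipped = current.copy()
--             flipped[i] = 1 - flipped[i]
--             rec(i + 1, remaining - 1, flipped)
--
--     rec(0, k, list(solution))
--     return neighbours
-- ===== Notes on version B (the rewrite author's own statement) =====
-- stated objective: alternative
-- what changed: Replaces the itertools.combinations enumeration plus a per-combination flip loop with a recursive index chooser that flips each chosen bit incrementally as it descends, emitting finished neighbours at the base case in the same lexicographic order.
import Mathlib
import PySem

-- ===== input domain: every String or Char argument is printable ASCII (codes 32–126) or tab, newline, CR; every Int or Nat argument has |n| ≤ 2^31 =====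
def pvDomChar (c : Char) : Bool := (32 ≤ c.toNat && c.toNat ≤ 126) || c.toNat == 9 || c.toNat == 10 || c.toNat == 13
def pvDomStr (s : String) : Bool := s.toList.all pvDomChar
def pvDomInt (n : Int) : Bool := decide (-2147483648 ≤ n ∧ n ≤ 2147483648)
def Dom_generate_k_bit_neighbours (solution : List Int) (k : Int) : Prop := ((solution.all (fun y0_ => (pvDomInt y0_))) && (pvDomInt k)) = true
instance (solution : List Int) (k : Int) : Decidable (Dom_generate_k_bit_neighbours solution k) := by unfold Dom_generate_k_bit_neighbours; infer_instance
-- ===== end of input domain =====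

-- B is an alternative decomposition: a recursive index chooser flipping bits incrementally,
-- instead of A's enumerate-combinations-then-flip; equal output in the same order.

-- ===== PORT A =====
-- neighbour[i] = 1 - neighbour[i]  (i is always a valid nonnegative index here)
def pyFlip (xs : List Int) (i : Int) : List Int :=
  match PySem.List.pyGet? xs i with
  | some v => xs.set i.toNat (1 - v)
  | none => xs   -- unreachable: every index fed to pyFlip lies in range

-- itertools.combinations over a list of indices, in itertools' lexicographic order
def combosA : List Int → Nat → List (List Int)
  | _, 0 => [[]]
  | [], _ + 1 => []
  | x :: xs, r + 1 => (combosA xs r).map (fun c => x :: c) ++ combosA xs (r + 1)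

def generate_k_bit_neighbours (solution : List Int) (k : Int) : List (List Int) :=
  if k < 0 then []   -- Python: itertools.combinations raises ValueError; excluded by Pre_
  else
    let indices := PySem.List.pyRange 0 (solution.length : Int) 1
    (combosA indices k.toNat).map (fun bit_indices =>
      bit_indices.foldl (fun neighbour i => pyFlip neighbour i) solution)

-- ===== PORT B =====
-- rec(start, remaining, current): flip bit i for i in range(start, n - remaining + 1) and recurse
def altRec (n : Int) (start : Int) (rem : Nat) (cur : List Int) : List (List Int) :=
  match rem with
  | 0 => [cur]
  | r + 1 =>
    (PySem.List.pyRange start (n - ((r : Int) + 1) + 1) 1).flatMap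
      (fun i => altRec n (i + 1) r (pyFlip cur i))

def generate_k_bit_neighbours_alt (solution : List Int) (k : Int) : List (List Int) :=
  if k < 0 then []   -- Source B raises ValueError here; excluded by Pre_
  else altRec (solution.length : Int) 0 k.toNat solution

-- ===== PRECONDITION & SPEC =====
-- Pre_ excludes k < 0, on which both Pythons raise ValueError.
def Pre_generate_k_bit_neighbours (solution : List Int) (k : Int) : Prop := 0 ≤ k
instance (solution : List Int) (k : Int) : Decidable (Pre_generate_k_bit_neighbours solution k) := by unfold Pre_generate_k_bit_neighbours; infer_instance
def pvWitness_generate_k_bit_neighbours : List Int × Int := ([0, 1, 1], 2)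
def Spec_generate_k_bit_neighbours (solution : List Int) (k : Int) (out : List (List Int)) : Prop := out = generate_k_bit_neighbours_alt solution k
instance (solution : List Int) (k : Int) (out : List (List Int)) : Decidable (Spec_generate_k_bit_neighbours solution k out) := by unfold Spec_generate_k_bit_neighbours; infer_instance

-- ===== CLAIM (what is proved, stated in full; the proofs are below) =====
def Claim_equal_generate_k_bit_neighbours : Prop := ∀ (solution : List Int) (k : Int), Dom_generate_k_bit_neighbours solution k → Pre_generate_k_bit_neighbours solution k → Spec_generate_k_bit_neighbours solution k (generate_k_bit_neighbours solution k)

-- ===== LEMMAS AND PROOFS =====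

lemma combosA_nil_of_lt (xs : List Int) (r : Nat) (h : xs.length < r) : combosA xs r = [] := by
  induction xs generalizing r with
  | nil =>
    match r with
    | r + 1 => rfl
  | cons x xs ih =>
    match r with
    | r + 1 =>
      simp only [combosA]
      rw [ih r (by simpa using Nat.lt_of_succ_lt_succ h),
          ih (r + 1) (Nat.lt_of_succ_lt_succ (Nat.lt_succ_of_lt h))]
      rfl

-- unfolding combinations of a contiguous index range by the first chosen index
lemma combos_range_succ (n : Int) (r : Nat) (m : Nat) :
    ∀ start : Int, (n - start).toNat ≤ m →
      combosA (PySem.List.pyRange start n 1) (r + 1) =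
        (PySem.List.pyRange start (n - (r : Int)) 1).flatMap
          (fun i => (combosA (PySem.List.pyRange (i + 1) n 1) r).map (fun c => i :: c)) := by
  induction m with
  | zero =>
    intro start hm
    have h1 : PySem.List.pyRange start n 1 = [] :=
      PySem.List.pyRange_one_eq_nil (by omega)
    have h2 : PySem.List.pyRange start (n - (r : Int)) 1 = [] :=
      PySem.List.pyRange_one_eq_nil (by omega)
    rw [h1, h2]
    rfl
  | succ m ih =>
    intro start hm
    by_cases h : start < n - (r : Int)
    · have hsn : start < n := by omega
      rw [PySem.List.pyRange_one_cons hsn, PySem.List.pyRange_one_cons h]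
      simp only [combosA, List.flatMap_cons]
      rw [ih (start + 1) (by omega)]
    · have h1 : PySem.List.pyRange start (n - (r : Int)) 1 = [] :=
        PySem.List.pyRange_one_eq_nil (by omega)
      have h2 : combosA (PySem.List.pyRange start n 1) (r + 1) = [] := by
        apply combosA_nil_of_lt
        rw [PySem.List.length_pyRange_one]
        omega
      rw [h1, h2]
      rfl

lemma altRec_eq (n : Int) (r : Nat) :
    ∀ (start : Int) (cur : List Int),
      altRec n start r cur =
        (combosA (PySem.List.pyRange start n 1) r).map (fun c => c.foldl pyFlip cur) := by
  induction r with
  | zero =>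
    intro start cur
    simp [altRec, combosA]
  | succ r ih =>
    intro start cur
    have harg : n - ((r : Int) + 1) + 1 = n - (r : Int) := by ring
    simp only [altRec, harg]
    rw [combos_range_succ n r (n - start).toNat start le_rfl]
    rw [List.map_flatMap]
    have hfun : (fun i => altRec n (i + 1) r (pyFlip cur i)) =
        (fun i => ((combosA (PySem.List.pyRange (i + 1) n 1) r).map (fun c => i :: c)).map
          (fun c => c.foldl pyFlip cur)) := by
      funext i
      rw [ih]
      simp [List.map_map, Function.comp, List.foldl_cons]
    rw [hfun]

-- ===== VERDICT (by name: the statement is the Claim_ definition above) =====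
theorem generate_k_bit_neighbours_spec : Claim_equal_generate_k_bit_neighbours := by
  intro solution k _ hpre
  unfold Spec_generate_k_bit_neighbours generate_k_bit_neighbours generate_k_bit_neighbours_alt
  have hk : ¬ k < 0 := by exact not_lt.mpr hpre
  simp only [hk, if_false]
  exact (altRec_eq (solution.length : Int) k.toNat 0 solution).symm ▸ rfl
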